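-- pv_equiv track=rewrite | github.com/Devieus/PythonProceduralMusicComposer | 3 7 Subtlety.py | vocals
-- ===== SOURCE A (Python) =====
-- def vocals(track):
--     result=[]
--     # Bar is exactly the same as the range of any songDic that's filled out. This just ensures it syncs right.
--     for x in range(len(track)):
--         # Start with a 0.
--         result.append([0])
--         # The voice is synced to the bar, but numbers are required, plus notes are combined.
--         for y in track[x]:
--             index=0
--             # If the next note is an accidental.
--             if y[0]=='_':
--                 index+=1
--             # If it's a rest, subtract the length of it from the latest number.
--             if y[0]=='z':
--                 # Check to see if the current number is 0 (because it's the first) or negative.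
--                 if result[x][len(result[x])-1]>0:
--                     # If it isn't, add a new number to work on.
--                     result[x].append(0)
--                 # If y doesn't have a number, i.e. it's length 1,
--                 if len(y)==1:
--                     # Subtract that 1 from the count.
--                     result[x][len(result[x])-1]-=1
--                 else:
--                     # Subtract the rest length from the number.
--                     result[x][len(result[x])-1]-=int(y[1])
--             # The next thing is a note.
--             else:
--                 # Check to see if the current number is 0 (because it's the first) or positive or 4 syllables long.
--                 if result[x][len(result[x])-1]<0 or result[x][len(result[x])-1]>=4:
--                     # If it isn't, add a new number to work on.
--                     result[x].append(0)
--                 # If y doesn't have a number, i.e. it's length 1,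
--                 if len(y)==1+index:
--                     # Add that 1 from the count.
--                     result[x][len(result[x])-1]+=1
--                 else:
--                     # Add the note length from the number.
--                     result[x][len(result[x])-1]+=int(y[-1])
--     return result
-- ===== SOURCE B (Python) =====
-- def _parse(y):
--     # parse one note string into a tagged pair (is_rest, value)
--     if y[0] == 'z':
--         return (True, 1 if len(y) == 1 else int(y[1]))
--     index = 1 if y[0] == '_' else 0
--     return (False, 1 if len(y) == 1 + index else int(y[-1]))
--
--
-- def _fits(cur, tok):
--     # does this token still belong to the group currently worth `cur`?
--     r, v = tok
--     return cur <= 0 if r else (0 <= cur < 4)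
--
--
-- def _groups(toks):
--     # greedy: emit one maximal group per outer iteration, consuming the
--     # token stack (reversed list popped from the top = front of the bar)
--     stack = list(reversed(toks))
--     groups = []
--     while True:
--         cur = 0
--         while stack and _fits(cur, stack[-1]):
--             r, v = stack.pop()
--             cur = cur - v if r else cur + v
--         groups.append(cur)
--         if not stack:
--             return groups
--
--
-- def vocals(track):
--     return [_groups([_parse(y) for y in bar]) for bar in track]
-- ===== Notes on version B (the rewrite author's own statement) =====
-- stated objective: alternative
-- what changed: B parses each bar into (is_rest, value) tokens and then emits groups greedily, one maximal group per outer-loop iteration via an inner consume-while-it-fits loop over a token stack, instead of A's single token loop that mutates the last element of a growing result list with flush-before-accumulate branches.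
import Mathlib
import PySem

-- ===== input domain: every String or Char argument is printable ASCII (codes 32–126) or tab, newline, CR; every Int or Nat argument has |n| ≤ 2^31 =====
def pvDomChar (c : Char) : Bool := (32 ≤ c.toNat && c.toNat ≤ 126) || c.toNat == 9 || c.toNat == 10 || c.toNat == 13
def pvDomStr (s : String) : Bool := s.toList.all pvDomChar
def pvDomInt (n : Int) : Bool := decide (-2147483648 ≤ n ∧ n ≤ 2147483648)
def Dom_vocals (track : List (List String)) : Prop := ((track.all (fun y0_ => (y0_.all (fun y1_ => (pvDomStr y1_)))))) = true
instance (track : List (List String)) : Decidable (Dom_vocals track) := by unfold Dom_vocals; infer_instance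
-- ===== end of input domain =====

-- B replaces A's token-by-token mutation of the last element of a growing result list by a
-- greedy group-at-a-time consumption: parse the bar into (is_rest, value) tokens, then
-- repeatedly consume one maximal group from the token stack and emit it; objective: simpler.

-- ===== PORT A =====

-- int(<single char c>); the `none` case (Python ValueError / IndexError) is excluded by Pre_vocals.
def pvIntChar (oc : Option Char) : Int :=
  match oc with
  | none => 0
  | some c => (PySem.Int.ofChars? [c]).getD 0

-- result[x][len(result[x])-1] : the list is always nonempty here, so the index is in range and
-- the `.getD 0` default is unreachable.
def pvLast (l : List Int) : Int := (PySem.List.pyGet? l ((l.length : Int) - 1)).getD 0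

-- result[x][len(result[x])-1] = v : exact for assignment at the last index of a nonempty list.
def pvSetLast (l : List Int) (v : Int) : List Int := l.dropLast ++ [v]

-- the body of A's inner `for y in track[x]` loop, acting on the bar's list `res`
def vocalsStepA (res : List Int) (y : String) : List Int :=
  let cs := y.toList
  let index : Nat := if PySem.List.pyGet? cs 0 = some '_' then 1 else 0
  if PySem.List.pyGet? cs 0 = some 'z' then
    let res1 := if pvLast res > 0 then res ++ [0] else res
    if cs.length = 1 then pvSetLast res1 (pvLast res1 - 1)
    else pvSetLast res1 (pvLast res1 - pvIntChar (PySem.List.pyGet? cs 1))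
  else
    let res1 := if pvLast res < 0 ∨ pvLast res ≥ 4 then res ++ [0] else res
    if cs.length = 1 + index then pvSetLast res1 (pvLast res1 + 1)
    else pvSetLast res1 (pvLast res1 + pvIntChar (PySem.List.pyGet? cs (-1)))

def vocals (track : List (List String)) : List (List Int) :=
  track.foldl (fun result bar => result ++ [bar.foldl vocalsStepA [0]]) []

-- ===== PORT B =====

-- _parse: one note string into (is_rest, value)
def parseNote (y : String) : Bool × Int :=
  let cs := y.toList
  if PySem.List.pyGet? cs 0 = some 'z' then
    (true, if cs.length = 1 then 1 else pvIntChar (PySem.List.pyGet? cs 1))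
  else
    let index : Nat := if PySem.List.pyGet? cs 0 = some '_' then 1 else 0
    (false, if cs.length = 1 + index then 1 else pvIntChar (PySem.List.pyGet? cs (-1)))

-- _fits: does this token still belong to the group currently worth `cur`?
def fitsTok (cur : Int) (t : Bool × Int) : Bool :=
  if t.1 then decide (cur ≤ 0) else decide (0 ≤ cur ∧ cur < 4)

-- the inner `while stack and _fits(...)` loop of _groups: popping the reversed-list stack is
-- exactly structural consumption of the token list from the front
def extendGrp : Int → List (Bool × Int) → Int × List (Bool × Int)
  | cur, [] => (cur, [])
  | cur, t :: rest =>
      if fitsTok cur t then extendGrp (if t.1 then cur - t.2 else cur + t.2) rest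
      else (cur, t :: rest)

theorem extendGrp_len : ∀ (toks : List (Bool × Int)) (cur : Int),
    (extendGrp cur toks).2.length ≤ toks.length := by
  intro toks
  induction toks with
  | nil => intro cur; simp [extendGrp]
  | cons t rest ih =>
    intro cur
    simp only [extendGrp]
    split
    · exact Nat.le_succ_of_le (ih _)
    · simp

theorem extendGrp_zero_lt (t : Bool × Int) (toks : List (Bool × Int)) :
    (extendGrp 0 (t :: toks)).2.length < (t :: toks).length := by
  have hf : fitsTok 0 t = true := by
    unfold fitsTok; split <;> simp
  simp only [extendGrp, hf, if_true, List.length_cons]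
  exact Nat.lt_succ_of_le (extendGrp_len _ _)

-- the outer `while True` loop of _groups: emit one maximal group, repeat on the leftover stack
def groupsOf (toks : List (Bool × Int)) : List Int :=
  match h : extendGrp 0 toks with
  | (cur, rest) =>
    if hr : rest = [] then [cur]
    else cur :: groupsOf rest
termination_by toks.length
decreasing_by
  cases toks with
  | nil => simp [extendGrp] at h; simp [h.2] at hr
  | cons t ts =>
    have := extendGrp_zero_lt t ts
    rw [h] at this
    exact this

def vocals_alt (track : List (List String)) : List (List Int) :=
  track.map (fun bar => groupsOf (bar.map parseNote))

-- ===== PRECONDITION & SPEC =====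
-- Pre_ excludes exactly the inputs where Python A raises: an empty note string (IndexError on
-- y[0]), or an int() call on a non-digit character (ValueError): int(y[1]) for a rest longer
-- than one char, int(y[-1]) for a note whose length is not 1+index.
def pvNoteOK (y : String) : Bool :=
  match y.toList with
  | [] => false
  | c :: rest =>
    if c = 'z' then rest.isEmpty || (rest.head?.map Char.isDigit).getD false
    else
      decide ((c :: rest).length = 1 + (if c = '_' then 1 else 0))
        || ((c :: rest).getLast?.map Char.isDigit).getD false

def Pre_vocals (track : List (List String)) : Prop :=
  (track.all (fun bar => bar.all pvNoteOK)) = true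

instance (track : List (List String)) : Decidable (Pre_vocals track) := by
  unfold Pre_vocals; infer_instance

def pvWitness_vocals : List (List String) := [["c2", "z", "_d", "a", "b", "z2", "e4"], ["z3"]]

def Spec_vocals (track : List (List String)) (out : List (List Int)) : Prop := out = vocals_alt track
instance (track : List (List String)) (out : List (List Int)) : Decidable (Spec_vocals track out) := by unfold Spec_vocals; infer_instance

-- ===== CLAIM (what is proved, stated in full; the proofs are below) =====
def Claim_equal_vocals : Prop := ∀ (track : List (List String)), Dom_vocals track → Pre_vocals track → Spec_vocals track (vocals track)

-- ===== LEMMAS AND PROOFS =====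

-- proof-side bridge: A's inner loop phrased as a fold over parsed tokens with state
-- (finished groups, current group)
def groupStep (st : List Int × Int) (p : Bool × Int) : List Int × Int :=
  match p with
  | (true, v) => if st.2 > 0 then (st.1 ++ [st.2], -v) else (st.1, st.2 - v)
  | (false, v) => if st.2 < 0 ∨ st.2 ≥ 4 then (st.1 ++ [st.2], v) else (st.1, st.2 + v)

theorem pvLast_concat (g : List Int) (c : Int) : pvLast (g ++ [c]) = c := by
  have h : ((g ++ [c]).length : Int) - 1 = (g.length : Nat) := by simp
  rw [pvLast, h, PySem.List.pyGet?_natCast]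
  simp

theorem pvSetLast_concat (g : List Int) (c v : Int) : pvSetLast (g ++ [c]) v = g ++ [v] := by
  simp [pvSetLast]

theorem pvLast_concat2 (g : List Int) (c d : Int) : pvLast (g ++ [c, d]) = d := by
  rw [show g ++ [c, d] = (g ++ [c]) ++ [d] by simp, pvLast_concat]

theorem pvSetLast_concat2 (g : List Int) (c d v : Int) :
    pvSetLast (g ++ [c, d]) v = g ++ [c, v] := by
  rw [show g ++ [c, d] = (g ++ [c]) ++ [d] by simp, pvSetLast_concat]
  simp

theorem step_agree (g : List Int) (c : Int) (y : String) :
    vocalsStepA (g ++ [c]) y =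
      (groupStep (g, c) (parseNote y)).1 ++ [(groupStep (g, c) (parseNote y)).2] := by
  unfold vocalsStepA parseNote groupStep
  by_cases hz : PySem.List.pyGet? y.toList 0 = some 'z' <;>
    simp only [hz, if_true, if_false] <;>
    split_ifs <;>
    simp_all [pvLast_concat, pvSetLast_concat, pvLast_concat2, pvSetLast_concat2]

theorem fold_agree (ys : List String) (g : List Int) (c : Int) :
    ys.foldl vocalsStepA (g ++ [c]) =
      ((ys.map parseNote).foldl groupStep (g, c)).1 ++
        [((ys.map parseNote).foldl groupStep (g, c)).2] := by
  induction ys generalizing g c with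
  | nil => simp
  | cons y ys ih =>
    simp only [List.foldl_cons, List.map_cons, step_agree]
    exact ih _ _

-- groupsOf with an arbitrary starting current group (proof-side only)
def groupsFrom (cur : Int) (toks : List (Bool × Int)) : List Int :=
  match extendGrp cur toks with
  | (c, rest) => if rest = [] then [c] else c :: groupsOf rest

theorem groupsOf_eq_from (toks : List (Bool × Int)) : groupsOf toks = groupsFrom 0 toks := by
  rw [groupsOf, groupsFrom]
  rcases hE : extendGrp 0 toks with ⟨c, rest⟩
  by_cases h : rest = [] <;> simp [h]

theorem groupsFrom_nil (cur : Int) : groupsFrom cur [] = [cur] := by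
  simp [groupsFrom, extendGrp]

theorem groupsFrom_fits (cur : Int) (t : Bool × Int) (rest : List (Bool × Int))
    (h : fitsTok cur t = true) :
    groupsFrom cur (t :: rest) = groupsFrom (if t.1 then cur - t.2 else cur + t.2) rest := by
  simp only [groupsFrom, extendGrp, h, if_true]

theorem groupsFrom_break (cur : Int) (t : Bool × Int) (rest : List (Bool × Int))
    (h : fitsTok cur t = false) :
    groupsFrom cur (t :: rest) = cur :: groupsFrom 0 (t :: rest) := by
  conv_lhs => rw [groupsFrom]
  simp only [extendGrp, h]
  simp [groupsOf_eq_from]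

theorem fold_groupsFrom (toks : List (Bool × Int)) :
    ∀ (g : List Int) (c : Int),
      (toks.foldl groupStep (g, c)).1 ++ [(toks.foldl groupStep (g, c)).2] =
        g ++ groupsFrom c toks := by
  induction toks with
  | nil => intro g c; simp [groupsFrom_nil]
  | cons t rest ih =>
    intro g c
    obtain ⟨r, v⟩ := t
    by_cases hf' : fitsTok c (r, v) = true
    · -- token fits: groupStep keeps the group
      have hstep : groupStep (g, c) (r, v) = (g, if r then c - v else c + v) := by
        unfold fitsTok at hf'
        cases r <;> simp_all [groupStep]
      rw [List.foldl_cons, hstep, ih, groupsFrom_fits _ _ _ hf']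
    · have hf' : fitsTok c (r, v) = false := Bool.not_eq_true _ |>.mp hf'
      have hstep : groupStep (g, c) (r, v) =
          (g ++ [c], if r then (0 : Int) - v else 0 + v) := by
        unfold fitsTok at hf'
        cases r <;> simp_all [groupStep]
      rw [List.foldl_cons, hstep, ih, groupsFrom_break _ _ _ hf',
        groupsFrom_fits 0 (r, v) rest (by unfold fitsTok; cases r <;> simp)]
      simp

theorem bar_agree (ys : List String) :
    ys.foldl vocalsStepA [0] = groupsOf (ys.map parseNote) := by
  have h := fold_agree ys [] 0
  rw [List.nil_append] at h
  rw [h, fold_groupsFrom, List.nil_append, groupsOf_eq_from]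

-- ===== VERDICT (by name: the statement is the Claim_ definition above) =====
theorem vocals_spec : Claim_equal_vocals := by
  intro track _ _
  unfold Spec_vocals vocals vocals_alt
  rw [PySem.List.foldl_append_singleton_eq_map, List.nil_append]
  exact List.map_congr_left fun bar _ => bar_agree bar
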